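-- pv_equiv track=rewrite | github.com/ufbx/ufbx | misc/gen_xml_ctype.py | generate_bits
-- ===== SOURCE A (Python) =====
-- def generate_bits(categories):
--     for ix in range(256):
--         ch = chr(ix)
--         bits = 0
--         for bit, cat in enumerate(categories):
--             if ch in cat:
--                 bits |= 1 << bit
--         yield bits
-- ===== SOURCE B (Python) =====
-- def generate_bits(categories):
--     bits = [0] * 256
--     for bit, cat in enumerate(categories):
--         for c in cat:
--             o = ord(c)
--             if o < 256:
--                 bits[o] |= 1 << bit
--     yield from bits
-- ===== Notes on version B (the rewrite author's own statement) =====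
-- stated objective: faster
-- what changed: B builds the 256-entry table once by scattering each category's characters into it by ord (one pass over the categories), instead of A's per-index rescan of every category string for each of the 256 codes.
import Mathlib
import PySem

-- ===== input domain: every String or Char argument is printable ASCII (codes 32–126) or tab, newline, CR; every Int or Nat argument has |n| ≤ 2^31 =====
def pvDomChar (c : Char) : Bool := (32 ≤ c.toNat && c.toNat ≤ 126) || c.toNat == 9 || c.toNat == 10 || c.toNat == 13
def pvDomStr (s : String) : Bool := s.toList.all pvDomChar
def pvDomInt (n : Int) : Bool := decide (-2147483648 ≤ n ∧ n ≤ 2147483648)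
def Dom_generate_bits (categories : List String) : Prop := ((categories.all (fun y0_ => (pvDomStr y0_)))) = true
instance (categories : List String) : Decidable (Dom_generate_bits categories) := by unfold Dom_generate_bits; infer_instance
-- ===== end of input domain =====

-- B replaces A's per-code rescan of every category (256 × categories membership tests) by one
-- scatter pass over the categories into an indexed 256-entry table; the returned list is identical.

-- Python's '1 << bit' (bit = a nonnegative enumerate index, taken as a Nat); used by both ports.
def pyShl1 (bit : Nat) : Int := (1 : Int) <<< bit

-- ===== PORT A =====
-- for ix in range(256): ch = chr(ix); bits = 0; for bit, cat in enumerate(categories): if ch in cat: bits |= 1 << bit; yield bits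
-- ('ch in cat' for the single character ch is exactly Char membership in cat.toList)
def generate_bits (categories : List String) : List Int :=
  (PySem.List.pyRange 0 256 1).map (fun ix =>
    (PySem.List.enumerate categories 0).foldl
      (fun bits p =>
        if Char.ofNat ix.toNat ∈ p.2.toList then PySem.Int.bor bits (pyShl1 p.1.toNat)
        else bits) 0)

-- ===== PORT B =====
-- inner loop of Source B: for c in cat: o = ord(c); if o < 256: bits[o] |= 1 << bit
def scatterCat (bit : Nat) (chars : List Char) (t : List Int) : List Int :=
  chars.foldl (fun t c =>
    if c.toNat < 256 then
      t.set c.toNat (PySem.Int.bor (t.getD c.toNat 0) (pyShl1 bit))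
    else t) t

-- bits = [0]*256; for bit, cat in enumerate(categories): <scatter cat>; yield from bits
def generate_bits_alt (categories : List String) : List Int :=
  (PySem.List.enumerate categories 0).foldl
    (fun t p => scatterCat p.1.toNat p.2.toList t) (List.replicate 256 0)

-- ===== PRECONDITION & SPEC =====
def Spec_generate_bits (categories : List String) (out : List Int) : Prop := out = generate_bits_alt categories
instance (categories : List String) (out : List Int) : Decidable (Spec_generate_bits categories out) := by unfold Spec_generate_bits; infer_instance

-- ===== CLAIM (what is proved, stated in full; the proofs are below) =====
def Claim_equal_generate_bits : Prop := ∀ (categories : List String), Dom_generate_bits categories → Spec_generate_bits categories (generate_bits categories)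

-- ===== LEMMAS AND PROOFS =====

-- the bitmask that character code i receives from categories, starting at bit k (Nat-valued)
def maskN (cats : List String) (k : Nat) (i : Nat) : Nat :=
  match cats with
  | [] => 0
  | c :: cs => (if Char.ofNat i ∈ c.toList then 1 <<< k else 0) ||| maskN cs (k + 1) i

-- Nat shadow of scatterCat (all table entries stay nonnegative)
def scatterCatN (bit : Nat) (chars : List Char) (t : List Nat) : List Nat :=
  chars.foldl (fun t c =>
    if c.toNat < 256 then t.set c.toNat ((t.getD c.toNat 0) ||| (1 <<< bit)) else t) t

lemma pyShl1_cast (k : Nat) : pyShl1 k = (((1 <<< k : Nat) : Int)) := by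
  unfold pyShl1
  rw [show (1 : Int) = ((1 : Nat) : Int) from rfl, Int.natCast_shiftLeft]

lemma scatterCat_cast (bit : Nat) (chars : List Char) (t : List Nat) :
    scatterCat bit chars (t.map (Nat.cast : Nat → Int)) =
      (scatterCatN bit chars t).map (Nat.cast : Nat → Int) := by
  induction chars generalizing t with
  | nil => rfl
  | cons c cs ih =>
    simp only [scatterCat, scatterCatN, List.foldl_cons] at *
    by_cases h : c.toNat < 256
    · simp only [h, if_pos]
      rw [show ((0 : Int) = ((0 : Nat) : Int)) from rfl, List.getD_map,
        pyShl1_cast, PySem.Int.bor_natCast, ← List.map_set]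
      exact ih _
    · simp only [h, if_neg, not_false_iff]
      exact ih t

lemma scatterCatN_length (bit : Nat) (chars : List Char) (t : List Nat) :
    (scatterCatN bit chars t).length = t.length := by
  induction chars generalizing t with
  | nil => rfl
  | cons c cs ih =>
    simp only [scatterCatN, List.foldl_cons] at *
    split_ifs with h
    · rw [ih]; simp
    · exact ih t

lemma scatterCatN_getD (bit : Nat) (chars : List Char) (t : List Nat) (i : Nat)
    (ht : t.length = 256) (hi : i < 256) :
    (scatterCatN bit chars t).getD i 0 =
      if chars.any (fun c => c.toNat == i) then t.getD i 0 ||| (1 <<< bit)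
      else t.getD i 0 := by
  induction chars generalizing t with
  | nil => simp [scatterCatN]
  | cons c cs ih =>
    simp only [scatterCatN, List.foldl_cons] at *
    by_cases h : c.toNat < 256
    · simp only [h, if_pos]
      have ht' : (t.set c.toNat (t.getD c.toNat 0 ||| 1 <<< bit)).length = 256 := by
        simp [ht]
      rw [ih _ ht']
      by_cases hc : c.toNat = i
      · subst hc
        have hset : (t.set c.toNat (t.getD c.toNat 0 ||| 1 <<< bit)).getD c.toNat 0 =
            t.getD c.toNat 0 ||| 1 <<< bit := by
          rw [List.getD_eq_getElem?_getD, List.getElem?_set_self (by omega), Option.getD_some]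
        rw [hset]
        simp only [List.any_cons, beq_self_eq_true, Bool.true_or, if_true, Nat.or_assoc,
          Nat.or_self, ite_self]
      · have hset : (t.set c.toNat (t.getD c.toNat 0 ||| 1 <<< bit)).getD i 0 = t.getD i 0 := by
          rw [List.getD_eq_getElem?_getD, List.getElem?_set_ne hc, ← List.getD_eq_getElem?_getD]
        rw [hset]
        simp [hc]
    · simp only [h, if_neg, not_false_iff]
      rw [ih _ ht]
      have hc : ¬ (c.toNat = i) := by omega
      simp [hc]

lemma mem_iff_any (l : List Char) (i : Nat) (hi : i < 256) :
    (l.any (fun c => c.toNat == i) = true) ↔ Char.ofNat i ∈ l := by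
  simp only [List.any_eq_true, beq_iff_eq]
  constructor
  · rintro ⟨c, hc, rfl⟩
    rwa [Char.ofNat_toNat]
  · intro h
    refine ⟨Char.ofNat i, h, ?_⟩
    rw [Char.toNat_ofNat, if_pos (Or.inl (by omega))]

lemma outer_foldN_cast (l : List (Int × String)) (t : List Nat) :
    l.foldl (fun t p => scatterCat p.1.toNat p.2.toList t) (t.map (Nat.cast : Nat → Int)) =
      (l.foldl (fun t p => scatterCatN p.1.toNat p.2.toList t) t).map (Nat.cast : Nat → Int) := by
  induction l generalizing t with
  | nil => rfl
  | cons p l ih => simp only [List.foldl_cons, scatterCat_cast]; exact ih _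

lemma outer_foldN_length (l : List (Int × String)) (t : List Nat) :
    (l.foldl (fun t p => scatterCatN p.1.toNat p.2.toList t) t).length = t.length := by
  induction l generalizing t with
  | nil => rfl
  | cons p l ih => simp only [List.foldl_cons]; rw [ih, scatterCatN_length]

lemma outer_foldN_getD (cats : List String) (k : Nat) (t : List Nat) (i : Nat)
    (ht : t.length = 256) (hi : i < 256) :
    ((PySem.List.enumerate cats (k : Int)).foldl
        (fun t p => scatterCatN p.1.toNat p.2.toList t) t).getD i 0 =
      t.getD i 0 ||| maskN cats k i := by
  induction cats generalizing k t with
  | nil => simp [PySem.List.enumerate_nil, maskN]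
  | cons c cs ih =>
    rw [PySem.List.enumerate_cons, List.foldl_cons]
    have hcast : ((k : Int) + 1) = ((k + 1 : Nat) : Int) := by push_cast; ring
    have ht' : (scatterCatN (Int.toNat (k : Int)) c.toList t).length = 256 := by
      rw [scatterCatN_length]; exact ht
    rw [hcast, ih (k + 1) _ ht']
    simp only [Int.toNat_natCast]
    rw [scatterCatN_getD _ _ _ _ ht hi, maskN]
    by_cases hmem : Char.ofNat i ∈ c.toList
    · rw [if_pos ((mem_iff_any c.toList i hi).2 hmem), if_pos hmem, Nat.or_assoc]
    · rw [if_neg ?hne, if_neg hmem, Nat.zero_or]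
      case hne =>
        intro h
        exact hmem ((mem_iff_any c.toList i hi).1 h)

lemma A_fold (cats : List String) (k : Nat) (i : Nat) (a : Nat) :
    (PySem.List.enumerate cats (k : Int)).foldl
        (fun bits p =>
          if Char.ofNat i ∈ p.2.toList then PySem.Int.bor bits (pyShl1 p.1.toNat)
          else bits) ((a : Nat) : Int) =
      ((a ||| maskN cats k i : Nat) : Int) := by
  induction cats generalizing k a with
  | nil => simp [PySem.List.enumerate_nil, maskN]
  | cons c cs ih =>
    rw [PySem.List.enumerate_cons, List.foldl_cons]
    have hcast : ((k : Int) + 1) = ((k + 1 : Nat) : Int) := by push_cast; ring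
    by_cases hmem : Char.ofNat i ∈ c.toList
    · simp only [hmem, if_pos, Int.toNat_natCast]
      rw [pyShl1_cast, PySem.Int.bor_natCast, hcast, ih (k + 1) (a ||| 1 <<< k)]
      rw [maskN, if_pos hmem, Nat.or_assoc]
    · simp only [hmem, if_neg, not_false_iff, Int.toNat_natCast]
      rw [hcast, ih (k + 1) a, maskN, if_neg hmem, Nat.zero_or]

-- ===== VERDICT (by name: the statement is the Claim_ definition above) =====
theorem generate_bits_spec : Claim_equal_generate_bits := by
  intro cats _
  unfold Spec_generate_bits
  have hBrew : generate_bits_alt cats =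
      ((PySem.List.enumerate cats ((0 : Nat) : Int)).foldl
        (fun t p => scatterCatN p.1.toNat p.2.toList t)
        (List.replicate 256 (0 : Nat))).map (Nat.cast : Nat → Int) := by
    unfold generate_bits_alt
    rw [show (List.replicate 256 (0 : Int)) = (List.replicate 256 (0 : Nat)).map Nat.cast by
          rw [List.map_replicate]; norm_num,
        outer_foldN_cast]
    norm_num
  rw [hBrew]
  set NB := (PySem.List.enumerate cats ((0 : Nat) : Int)).foldl
      (fun t p => scatterCatN p.1.toNat p.2.toList t) (List.replicate 256 (0 : Nat)) with hNB
  have hNBlen : NB.length = 256 := by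
    rw [hNB, outer_foldN_length, List.length_replicate]
  apply List.ext_getElem
  · simp [generate_bits, hNBlen, PySem.List.length_pyRange_one]
  · intro i h1 h2
    have hi : i < 256 := by simpa [hNBlen] using h2
    unfold generate_bits
    rw [List.getElem_map, List.getElem_map, PySem.List.getElem_pyRange_one]
    have hA := A_fold cats 0 i 0
    simp only [Nat.cast_zero, Nat.zero_or] at hA
    have hix : Char.ofNat ((0 : Int) + (i : Nat)).toNat = Char.ofNat i := by
      norm_num
    rw [hix, hA]
    have hB : NB.getD i 0 = maskN cats 0 i := by
      have h0 := outer_foldN_getD cats 0 (List.replicate 256 (0 : Nat)) i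
        (by rw [List.length_replicate]) hi
      rw [← hNB] at h0
      have hrep : (List.replicate 256 (0 : Nat)).getD i 0 = 0 := by
        rw [List.getD_eq_getElem?_getD, List.getElem?_replicate]
        simp [hi]
      rw [h0, hrep, Nat.zero_or]
    rw [← hB, List.getD_eq_getElem _ _ (by omega)]
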